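-- pv_equiv track=rewrite | github.com/KenzYo1/Shiny-Dollop-Calculator-Graphic- | Graphing Calculator.py | combine_decimals
-- ===== SOURCE A (Python) =====
-- def combine_decimals(fx):
--     i = 0
--     while i < len(fx)-1:
--         if fx[i] == ".":
--             fx[i-1] += fx.pop(i)
--             fx[i-1] += fx.pop(i)
--         i += 1
--     return fx
-- ===== SOURCE B (Python) =====
-- def combine_decimals(fx):
--     # Single left-to-right pass: whenever the next token is a "." with a token
--     # after it, the three tokens form one number token; otherwise the current
--     # token is kept as is.  Mutates fx in place (fx[:] = out) like the original.
--     out = []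
--     n = len(fx)
--     i = 0
--     while i < n:
--         if i + 2 < n and fx[i + 1] == ".":
--             out.append(fx[i] + "." + fx[i + 2])
--             i += 3
--         else:
--             out.append(fx[i])
--             i += 1
--     fx[:] = out
--     return fx
-- ===== Notes on version B (the rewrite author's own statement) =====
-- stated objective: alternative
-- what changed: Replaces A's in-place scan over a mutating list with repeated list.pop(i) by a one-pass lookahead that reads the untouched input and appends each token, or a merged fx[i]+'.'+fx[i+2] triple, to a fresh output list.
-- intended difference: On lists of length >= 3 starting with '.', A's negative-index wraparound glues the leading dot and the following token onto the LAST element (['.','5','+'] -> ['+.5']); B keeps the stray leading '.' in place and returns ['.','5','+'], the intended treatment of a dot with no left operand. — e.g. on combine_decimals([".", "5", "+"]): A returns ["+.5"], B returns [".", "5", "+"]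
import Mathlib
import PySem

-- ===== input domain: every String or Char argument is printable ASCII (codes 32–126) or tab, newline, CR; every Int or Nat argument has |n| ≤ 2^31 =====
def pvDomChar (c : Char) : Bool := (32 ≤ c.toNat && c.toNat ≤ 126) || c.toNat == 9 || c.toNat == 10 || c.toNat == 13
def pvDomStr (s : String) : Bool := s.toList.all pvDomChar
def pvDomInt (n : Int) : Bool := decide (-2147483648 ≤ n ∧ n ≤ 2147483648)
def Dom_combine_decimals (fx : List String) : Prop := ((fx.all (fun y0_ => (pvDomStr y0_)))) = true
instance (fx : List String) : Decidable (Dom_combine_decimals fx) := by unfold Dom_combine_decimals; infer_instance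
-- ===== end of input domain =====

-- B replaces A's in-place scan with repeated pop(i) by a one-pass lookahead over the
-- untouched input that appends tokens (or merged a-"."-b triples) to a fresh output list.
-- A mutates fx in place — the equivalence proved here is about the RETURN value (B performs
-- the same net mutation via fx[:] = out).

-- ===== PORT A =====
-- Literal port of A's while-loop.  State: current list fx, current index i (i only grows, so
-- it stays a Nat; the Python expression i-1 is ported as (i : Int) - 1, which is -1 at i = 0).
-- fuel = initial length bounds the number of iterations (each iteration does i += 1 and the
-- loop stops once i ≥ len(fx)-1 ≤ initial len - 1, so fuel is never exhausted mid-loop).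
-- Where Python raises (the pySet? at index -1 on an emptied list, input ['.', x]) the
-- primitive returns none and we return the current list — that input is outside Pre_.
def combineDecimalsLoop : Nat → List String → Nat → List String
  | 0, fx, _ => fx
  | fuel+1, fx, i =>
    if i < fx.length - 1 then
      if PySem.List.pyGetD fx (i : Int) "" = "." then
        -- fx[i-1] += fx.pop(i)   (Python reads fx[i-1] first, then pops, then stores)
        let v1 := PySem.List.pyGetD fx ((i : Int) - 1) ""
        match PySem.List.pop? fx (i : Int) with
        | none => fx
        | some (a1, fx1) =>
          match PySem.List.pySet? fx1 ((i : Int) - 1) (v1 ++ a1) with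
          | none => fx1
          | some fx2 =>
            -- fx[i-1] += fx.pop(i)   (second time)
            let v2 := PySem.List.pyGetD fx2 ((i : Int) - 1) ""
            match PySem.List.pop? fx2 (i : Int) with
            | none => fx2
            | some (a2, fx3) =>
              match PySem.List.pySet? fx3 ((i : Int) - 1) (v2 ++ a2) with
              | none => fx3
              | some fx4 => combineDecimalsLoop fuel fx4 (i + 1)
      else combineDecimalsLoop fuel fx (i + 1)
    else fx

def combine_decimals (fx : List String) : List String :=
  combineDecimalsLoop fx.length fx 0

-- ===== PORT B =====
-- Literal port of B's lookahead pass: out is the output accumulator, i the scan position in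
-- the untouched input.  fuel = fx.length bounds the iterations (i grows by ≥ 1 per iteration
-- and the loop stops once i ≥ n, so fuel is never exhausted mid-loop).  Indices are always in
-- range on the guarded paths, so pyGetD's default is never used.
def combineAltLoop : Nat → List String → List String → Nat → List String
  | 0, _, out, _ => out
  | fuel+1, fx, out, i =>
    if i < fx.length then
      if i + 2 < fx.length ∧ PySem.List.pyGetD fx ((i + 1 : Nat) : Int) "" = "." then
        combineAltLoop fuel fx
          (out ++ [PySem.List.pyGetD fx (i : Int) "" ++ "." ++ PySem.List.pyGetD fx ((i + 2 : Nat) : Int) ""])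
          (i + 3)
      else combineAltLoop fuel fx (out ++ [PySem.List.pyGetD fx (i : Int) ""]) (i + 1)
    else out

def combine_decimals_alt (fx : List String) : List String :=
  combineAltLoop fx.length fx [] 0

-- ===== PRECONDITION & SPEC =====
-- Pre_ excludes exactly the inputs where A raises IndexError: a two-element list starting
-- with ".", on which A's store fx[-1] = … happens on a list emptied by the two pops.
def Pre_combine_decimals (fx : List String) : Prop :=
  ¬ (fx.length = 2 ∧ fx.headD "" = ".")
instance (fx : List String) : Decidable (Pre_combine_decimals fx) := by
  unfold Pre_combine_decimals; infer_instance

def pvWitness_combine_decimals : List String := ["1", ".", "5"]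

-- On lists of length ≥ 3 starting with ".", A's negative-index wraparound glues the leading
-- dot and the following token onto the LAST element (['.','5','+'] → ['+.5']); B keeps the
-- stray leading "." in place (→ ['.','5','+']), the intended treatment of a dot with no left
-- operand.
def D_combine_decimals (fx : List String) : Prop :=
  3 ≤ fx.length ∧ fx.headD "" = "."
instance (fx : List String) : Decidable (D_combine_decimals fx) := by
  unfold D_combine_decimals; infer_instance

def Spec_combine_decimals (fx : List String) (out : List String) : Prop :=
  ¬ D_combine_decimals fx → out = combine_decimals_alt fx
instance (fx : List String) (out : List String) : Decidable (Spec_combine_decimals fx out) := by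
  unfold Spec_combine_decimals; infer_instance

def pvDiffWitness_combine_decimals : List String := [".", "5", "+"]
def pvDiffWitnessOut_combine_decimals : (List String) × (List String) :=
  (["+.5"], [".", "5", "+"])

-- ===== CLAIM (what is proved, stated in full; the proofs are below) =====
def Claim_unchanged_combine_decimals : Prop := ∀ (fx : List String), Dom_combine_decimals fx → Pre_combine_decimals fx → Spec_combine_decimals fx (combine_decimals fx)
def Claim_changed_combine_decimals : Prop := Dom_combine_decimals (pvDiffWitness_combine_decimals) ∧ Pre_combine_decimals (pvDiffWitness_combine_decimals) ∧ D_combine_decimals (pvDiffWitness_combine_decimals) ∧ combine_decimals (pvDiffWitness_combine_decimals) = pvDiffWitnessOut_combine_decimals.1 ∧ combine_decimals_alt (pvDiffWitness_combine_decimals) = pvDiffWitnessOut_combine_decimals.2 ∧ pvDiffWitnessOut_combine_decimals.1 ≠ pvDiffWitnessOut_combine_decimals.2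

-- ===== LEMMAS AND PROOFS =====

-- Proof-only intermediate: the same lookahead pass as B, phrased structurally on the
-- unscanned suffix.  Both ports are proved equal to pvScan.
def pvScan : List String → List String → List String
  | out, a :: b :: c :: rest =>
    if b = "." then pvScan (out ++ [a ++ "." ++ c]) rest
    else pvScan (out ++ [a]) (b :: c :: rest)
  | out, a :: rest => pvScan (out ++ [a]) rest
  | out, [] => out
  termination_by _ l => l.length
  decreasing_by all_goals simp; all_goals omega

lemma pv_getD_append_cons (pre ys : List String) (y d : String) :
    (pre ++ y :: ys).getD pre.length d = y := by
  simp [List.getD]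

lemma pv_eraseIdx_append_cons (pre ys : List String) (y : String) :
    (pre ++ y :: ys).eraseIdx pre.length = pre ++ ys := by
  simp [List.eraseIdx_append_of_length_le]

-- once i ≥ len(fx)-1 the A-loop returns fx for every fuel
lemma aLoop_exit (f : Nat) (fx : List String) (i : Nat) (h : fx.length ≤ i + 1) :
    combineDecimalsLoop f fx i = fx := by
  cases f with
  | zero => rfl
  | succ f => rw [combineDecimalsLoop, if_neg (by omega)]

lemma pv_eraseIdx_append_cons1 (pre ys : List String) (y z : String) :
    (pre ++ y :: z :: ys).eraseIdx (pre.length + 1) = pre ++ y :: ys := by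
  have := pv_eraseIdx_append_cons (pre ++ [y]) ys z
  simpa using this

lemma pv_getD_append_cons1 (pre ys : List String) (y z d : String) :
    (pre ++ y :: z :: ys).getD (pre.length + 1) d = z := by
  have := pv_getD_append_cons (pre ++ [y]) ys z d
  simpa using this

-- a step of pvScan that just appends the head (no merge applies)
lemma pvScan_step (out : List String) (a : String) (rest : List String)
    (h : ∀ b c r, rest = b :: c :: r → b ≠ ".") :
    pvScan out (a :: rest) = pvScan (out ++ [a]) rest := by
  match rest with
  | [] => simp [pvScan]
  | [b] => simp [pvScan]
  | b :: c :: r => rw [pvScan, if_neg (h b c r rfl)]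

-- B's port equals the structural lookahead pass
lemma alt_eq_scan_aux (fuel : Nat) : ∀ (fx out : List String) (i : Nat),
    fx.length - i ≤ fuel → combineAltLoop fuel fx out i = pvScan out (fx.drop i) := by
  induction fuel with
  | zero =>
    intro fx out i h
    rw [combineAltLoop, List.drop_eq_nil_of_le (by omega), pvScan]
  | succ f ih =>
    intro fx out i h
    rw [combineAltLoop]
    by_cases hi : i < fx.length
    case neg =>
      rw [if_neg hi, List.drop_eq_nil_of_le (by omega), pvScan]
    case pos =>
    rw [if_pos hi]
    have hdi : fx.drop i = fx[i] :: fx.drop (i + 1) := List.drop_eq_getElem_cons hi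
    have hgi : PySem.List.pyGetD fx ((i : Nat) : Int) "" = fx[i] := by
      rw [PySem.List.pyGetD_natCast]; exact List.getD_eq_getElem fx "" hi
    by_cases h2 : i + 2 < fx.length
    case pos =>
      have h1 : i + 1 < fx.length := by omega
      have hd1 : fx.drop (i + 1) = fx[i+1] :: fx.drop (i + 2) := List.drop_eq_getElem_cons h1
      have hd2 : fx.drop (i + 2) = fx[i+2] :: fx.drop (i + 3) := List.drop_eq_getElem_cons h2
      have hg1 : PySem.List.pyGetD fx ((i + 1 : Nat) : Int) "" = fx[i+1] := by
        rw [PySem.List.pyGetD_natCast]; exact List.getD_eq_getElem fx "" h1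
      have hg2 : PySem.List.pyGetD fx ((i + 2 : Nat) : Int) "" = fx[i+2] := by
        rw [PySem.List.pyGetD_natCast]; exact List.getD_eq_getElem fx "" h2
      by_cases hdot : fx[i+1] = "."
      case pos =>
        rw [if_pos ⟨h2, by rw [hg1, hdot]⟩, hgi, hg2, ih fx _ _ (by omega)]
        rw [hdi, hd1, hd2, pvScan, if_pos hdot]
      case neg =>
        rw [if_neg (by rw [hg1]; exact fun hc => hdot hc.2), hgi, ih fx _ _ (by omega)]
        rw [hdi, hd1, hd2, pvScan, if_neg hdot]
    case neg =>
      rw [if_neg (fun hc => h2 hc.1), hgi, ih fx _ _ (by omega), hdi]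
      rw [pvScan_step]
      intro b c r hbc
      exfalso
      have : (fx.drop (i + 1)).length ≥ 2 := by rw [hbc]; simp
      rw [List.length_drop] at this
      omega

lemma alt_eq_scan (fx : List String) : combine_decimals_alt fx = pvScan [] fx := by
  unfold combine_decimals_alt
  rw [alt_eq_scan_aux fx.length fx [] 0 (by omega), List.drop_zero]

-- Loop invariant for A: with scanned output o and pending left operand `last` in place
-- (index = o.length + 1, pointing at rest's head), A's in-place loop computes exactly the
-- lookahead pass pvScan o (last :: rest).
lemma aLoop_eq_scan (fuel : Nat) :
    ∀ (o : List String) (last : String) (rest : List String), rest.length ≤ fuel →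
      combineDecimalsLoop fuel ((o ++ [last]) ++ rest) (o.length + 1) =
        pvScan o (last :: rest) := by
  induction fuel with
  | zero =>
    intro o last rest h
    obtain rfl : rest = [] := List.length_eq_zero_iff.mp (Nat.le_zero.mp h)
    simp [combineDecimalsLoop, pvScan]
  | succ f ih =>
    intro o last rest h
    match rest with
    | [] =>
      rw [aLoop_exit _ _ _ (by simp)]
      simp [pvScan]
    | [b] =>
      rw [aLoop_exit _ _ _ (by simp)]
      simp [pvScan]
    | b :: c :: rs' =>
      rw [combineDecimalsLoop, if_pos (by simp)]
      have hget : PySem.List.pyGetD ((o ++ [last]) ++ b :: c :: rs') ((o.length + 1 : Nat) : Int) "" = b := by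
        rw [PySem.List.pyGetD_natCast]
        simpa using pv_getD_append_cons1 o (c :: rs') last b ""
      by_cases hb : b = "."
      · subst hb
        rw [if_pos hget]
        have e1 : (↑(o.length + 1) : Int) - 1 = ((o.length : Nat) : Int) := by push_cast; ring
        rw [e1]
        have hv1 : PySem.List.pyGetD (o ++ [last] ++ "." :: c :: rs') ((o.length : Nat) : Int) "" = last := by
          rw [PySem.List.pyGetD_natCast]
          simpa using pv_getD_append_cons o ("." :: c :: rs') last ""
        have hpop1 : PySem.List.pop? (o ++ [last] ++ "." :: c :: rs') ((o.length + 1 : Nat) : Int)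
            = some (".", o ++ [last] ++ c :: rs') := by
          rw [PySem.List.pop?_natCast (o ++ [last] ++ "." :: c :: rs') (o.length + 1) (by simp)]
          simp [pv_eraseIdx_append_cons1]
        have hset1 : PySem.List.pySet? (o ++ [last] ++ c :: rs') ((o.length : Nat) : Int) (last ++ ".")
            = some (o ++ (last ++ ".") :: c :: rs') := by
          rw [PySem.List.pySet?_natCast (o ++ [last] ++ c :: rs') o.length (last ++ ".") (by simp)]
          simp
        have hv2 : PySem.List.pyGetD (o ++ (last ++ ".") :: c :: rs') ((o.length : Nat) : Int) "" = last ++ "." := by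
          rw [PySem.List.pyGetD_natCast]
          simpa using pv_getD_append_cons o (c :: rs') (last ++ ".") ""
        have hpop2 : PySem.List.pop? (o ++ (last ++ ".") :: c :: rs') ((o.length + 1 : Nat) : Int)
            = some (c, o ++ (last ++ ".") :: rs') := by
          rw [PySem.List.pop?_natCast (o ++ (last ++ ".") :: c :: rs') (o.length + 1) (by simp)]
          simp [pv_eraseIdx_append_cons1]
        have hset2 : PySem.List.pySet? (o ++ (last ++ ".") :: rs') ((o.length : Nat) : Int) (last ++ "." ++ c)
            = some (o ++ (last ++ "." ++ c) :: rs') := by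
          rw [PySem.List.pySet?_natCast (o ++ (last ++ ".") :: rs') o.length (last ++ "." ++ c) (by simp)]
          simp
        simp only [hv1, hpop1, hset1, hv2, hpop2, hset2]
        rw [pvScan, if_pos rfl]
        match rs' with
        | [] =>
          rw [aLoop_exit _ _ _ (by simp)]
          simp [pvScan]
        | y :: rs'' =>
          have := ih (o ++ [last ++ "." ++ c]) y rs'' (by simp at h ⊢; omega)
          simpa using this
      · rw [if_neg (by rw [hget]; exact hb)]
        rw [pvScan, if_neg hb]
        have := ih (o ++ [last]) b (c :: rs') (by simp at h ⊢; omega)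
        simpa using this

-- ===== VERDICT (by name: the statement is the Claim_ definition above) =====
theorem combine_decimals_spec : Claim_unchanged_combine_decimals := by
  intro fx _hdom hpre hnd
  match fx with
  | [] => rw [alt_eq_scan]; simp [combine_decimals, combineDecimalsLoop, pvScan]
  | [r] => rw [alt_eq_scan]; simp [combine_decimals, combineDecimalsLoop, pvScan]
  | r :: x :: rs =>
    rw [alt_eq_scan]
    have hr : r ≠ "." := by
      intro hr
      cases rs with
      | nil => exact hpre ⟨rfl, by simp [hr]⟩
      | cons a as => exact hnd ⟨by simp, by simp [hr]⟩
    show combineDecimalsLoop (r :: x :: rs).length (r :: x :: rs) 0 = _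
    rw [show (r :: x :: rs).length = (rs.length + 1) + 1 from by simp]
    rw [combineDecimalsLoop, if_pos (by simp)]
    rw [if_neg (by simpa using hr)]
    have := aLoop_eq_scan (rs.length + 1) [] r (x :: rs) (by simp)
    simpa using this

theorem combine_decimals_changed : Claim_changed_combine_decimals := by
  unfold Claim_changed_combine_decimals; decide
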